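-- pv_equiv track=rewrite | github.com/Daniil-Vlasenko/SPBUComputationalMethods | Task3.1.py | sort_dic1
-- ===== SOURCE A (Python) =====
-- def sort_dic1(dic, x, n):
--     dic_keys = list(dic.keys())
--     dic_values = list(dic.values())
--     for i in range(len(dic) - 1):
--         for j in range(len(dic) - i - 1):
--             if abs(dic_keys[j] - x) > abs(dic_keys[j + 1] - x):
--                 dic_keys[j], dic_keys[j + 1] = dic_keys[j + 1], dic_keys[j]
--                 dic_values[j], dic_values[j + 1] = dic_values[j + 1], dic_values[j]
--     new_dic = {}
--     for j in range(n + 1):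
--         new_dic[dic_keys[j]] = dic_values[j]
--     return new_dic
-- ===== SOURCE B (Python) =====
-- def sort_dic1(dic, x, n):
--     items = sorted(dic.items(), key=lambda kv: abs(kv[0] - x))
--     return dict(items[:max(n + 1, 0)])
-- ===== Notes on version B (the rewrite author's own statement) =====
-- stated objective: faster
-- what changed: B replaces A's hand-written bubble sort over parallel key/value lists and index-driven dict rebuild by a single stable sorted() call on the item pairs keyed by abs(key-x) followed by one slice, changing O(m^2) adjacent swaps into an O(m log m) library sort.
import Mathlib
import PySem

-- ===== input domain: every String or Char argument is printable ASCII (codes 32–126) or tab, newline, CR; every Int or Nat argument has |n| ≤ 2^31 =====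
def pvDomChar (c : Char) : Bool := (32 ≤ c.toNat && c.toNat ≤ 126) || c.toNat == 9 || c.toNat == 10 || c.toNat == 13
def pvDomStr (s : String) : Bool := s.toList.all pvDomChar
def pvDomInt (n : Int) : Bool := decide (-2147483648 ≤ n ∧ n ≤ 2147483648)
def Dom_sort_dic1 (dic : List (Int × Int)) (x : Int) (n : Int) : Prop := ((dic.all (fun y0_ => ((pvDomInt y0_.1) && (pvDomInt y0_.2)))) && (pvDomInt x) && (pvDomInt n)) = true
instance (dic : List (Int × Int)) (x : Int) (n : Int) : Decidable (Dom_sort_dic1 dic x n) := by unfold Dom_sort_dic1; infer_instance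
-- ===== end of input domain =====

-- B replaces A's quadratic bubble sort of parallel key/value lists by one stable library sort
-- of the item pairs keyed by |key - x| plus a slice (objective: faster, O(m^2) -> O(m log m)).

-- ===== PORT A =====
-- One compare-and-swap of A's inner loop, acting on the pair of parallel lists (keys, values).
-- List.getD with a Nat index is exact here: every index Python touches is nonnegative, the
-- bubble loops only touch in-range indices, and the final loop leaves range exactly where
-- Python raises IndexError (those inputs are excluded by Pre_sort_dic1).
def pvStepA (x : Int) (st : List Int × List Int) (j : Nat) : List Int × List Int :=
  if |st.1.getD j 0 - x| > |st.1.getD (j+1) 0 - x| then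
    ((st.1.set j (st.1.getD (j+1) 0)).set (j+1) (st.1.getD j 0),
     (st.2.set j (st.2.getD (j+1) 0)).set (j+1) (st.2.getD j 0))
  else st

def sort_dic1 (dic : List (Int × Int)) (x : Int) (n : Int) : List (Int × Int) :=
  let m := dic.length
  let st := (List.range (m - 1)).foldl
      (fun st i => (List.range (m - i - 1)).foldl (pvStepA x) st)
      (dic.map Prod.fst, dic.map Prod.snd)
  ((List.range (n + 1).toNat).foldl
      (fun d j => d.insert (st.1.getD j 0) (st.2.getD j 0)) PySem.Dict.empty).items

-- ===== PORT B =====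
def sort_dic1_alt (dic : List (Int × Int)) (x : Int) (n : Int) : List (Int × Int) :=
  let items := PySem.List.sorted dic (fun kv => |kv.1 - x|)
  (PySem.Dict.ofList (PySem.List.slice items none (some (max (n + 1) 0)))).items

-- ===== PRECONDITION & SPEC =====
-- A raises IndexError as soon as the final loop index n+1 exceeds len(dic); Pre_ excludes exactly that.
def Pre_sort_dic1 (dic : List (Int × Int)) (x : Int) (n : Int) : Prop := n < (dic.length : Int)
instance (dic : List (Int × Int)) (x : Int) (n : Int) : Decidable (Pre_sort_dic1 dic x n) := by
  unfold Pre_sort_dic1; infer_instance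
def pvWitness_sort_dic1 : (List (Int × Int)) × Int × Int := ([(1, 2), (3, 4)], 2, 0)

def Spec_sort_dic1 (dic : List (Int × Int)) (x : Int) (n : Int) (out : List (Int × Int)) : Prop := out = sort_dic1_alt dic x n
instance (dic : List (Int × Int)) (x : Int) (n : Int) (out : List (Int × Int)) : Decidable (Spec_sort_dic1 dic x n out) := by unfold Spec_sort_dic1; infer_instance

-- ===== CLAIM (what is proved, stated in full; the proofs are below) =====
def Claim_equal_sort_dic1 : Prop := ∀ (dic : List (Int × Int)) (x : Int) (n : Int), Dom_sort_dic1 dic x n → Pre_sort_dic1 dic x n → Spec_sort_dic1 dic x n (sort_dic1 dic x n)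

-- ===== LEMMAS AND PROOFS =====

-- The sort key of A's comparisons, on item pairs.
def pvKey (x : Int) (p : Int × Int) : Int := |p.1 - x|

-- A's compare-and-swap re-expressed on the zipped list of item pairs.
def pvStepP (x : Int) (ps : List (Int × Int)) (j : Nat) : List (Int × Int) :=
  if pvKey x (ps.getD j (0, 0)) > pvKey x (ps.getD (j+1) (0, 0)) then
    (ps.set j (ps.getD (j+1) (0, 0))).set (j+1) (ps.getD j (0, 0))
  else ps

-- One bubble pass limited to the first k compare-and-swap positions.
def pvPassN (x : Int) : Nat → List (Int × Int) → List (Int × Int)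
  | 0, l => l
  | _+1, [] => []
  | _+1, [a] => [a]
  | k+1, a :: b :: t =>
      if pvKey x a > pvKey x b then b :: pvPassN x k (a :: t) else a :: pvPassN x k (b :: t)

lemma pvGetD_fst (l : List (Int × Int)) (j : Nat) :
    (l.map Prod.fst).getD j 0 = (l.getD j (0, 0)).1 := by
  induction l generalizing j with
  | nil => simp
  | cons a t ih =>
    cases j with
    | zero => simp
    | succ k => simpa using ih k

lemma pvGetD_snd (l : List (Int × Int)) (j : Nat) :
    (l.map Prod.snd).getD j 0 = (l.getD j (0, 0)).2 := by
  induction l generalizing j with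
  | nil => simp
  | cons a t ih =>
    cases j with
    | zero => simp
    | succ k => simpa using ih k

lemma pvStepA_eq (x : Int) (ps : List (Int × Int)) (j : Nat) :
    pvStepA x (ps.map Prod.fst, ps.map Prod.snd) j
      = ((pvStepP x ps j).map Prod.fst, (pvStepP x ps j).map Prod.snd) := by
  simp only [pvStepA, pvStepP, pvKey, pvGetD_fst, pvGetD_snd]
  split_ifs <;> simp [List.map_set]

lemma pvFoldl_hom {α β γ : Type} (g : α → β) (f : β → γ → β) (f' : α → γ → α)
    (h : ∀ s c, f (g s) c = g (f' s c)) (l : List γ) (s : α) :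
    l.foldl f (g s) = g (l.foldl f' s) := by
  induction l generalizing s with
  | nil => rfl
  | cons c t ih => simp only [List.foldl_cons, h, ih]

lemma pvStepP_cons (x : Int) (c : Int × Int) (r : List (Int × Int)) (j : Nat) :
    pvStepP x (c :: r) (j + 1) = c :: pvStepP x r j := by
  simp only [pvStepP, List.getD_cons_succ, List.set_cons_succ]
  split_ifs <;> rfl

lemma pvInner_eq (x : Int) : ∀ (L : Nat) (ps : List (Int × Int)), L + 1 ≤ ps.length →
    (List.range L).foldl (pvStepP x) ps = pvPassN x L ps := by
  intro L
  induction L with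
  | zero => intro ps _; simp [pvPassN]
  | succ L ih =>
    intro ps hlen
    match ps, hlen with
    | a :: b :: t, hlen =>
      rw [List.range_succ_eq_map, List.foldl_cons, List.foldl_map]
      have h0 : pvStepP x (a :: b :: t) 0 =
          if pvKey x a > pvKey x b then b :: a :: t else a :: b :: t := by
        simp only [pvStepP, List.getD_cons_zero, List.getD_cons_succ,
          List.set_cons_zero, List.set_cons_succ]
      rw [h0]
      split_ifs with hc
      · rw [pvFoldl_hom (fun r => b :: r) _ (pvStepP x) (fun s c => pvStepP_cons x b s c)
            (List.range L) (a :: t), ih (a :: t) (by simp at hlen ⊢; omega)]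
        simp [pvPassN, hc]
      · rw [pvFoldl_hom (fun r => a :: r) _ (pvStepP x) (fun s c => pvStepP_cons x a s c)
            (List.range L) (b :: t), ih (b :: t) (by simp at hlen ⊢; omega)]
        simp [pvPassN, hc]

lemma pvPassN_split (x : Int) : ∀ (L : Nat) (u d : List (Int × Int)), u.length = L + 1 →
    pvPassN x L (u ++ d) = pvPassN x L u ++ d := by
  intro L
  induction L with
  | zero => intro u d _; rfl
  | succ L ih =>
    intro u d h
    match u, h with
    | a :: b :: u', h =>
      simp only [List.cons_append, pvPassN]
      split_ifs with hc
      · rw [← List.cons_append, ih (a :: u') d (by simp at h ⊢; omega)]; rfl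
      · rw [← List.cons_append, ih (b :: u') d (by simp at h ⊢; omega)]; rfl

lemma pvPassN_filter (x : Int) (c : Int) : ∀ (k : Nat) (l : List (Int × Int)),
    (pvPassN x k l).filter (fun p => pvKey x p == c) = l.filter (fun p => pvKey x p == c) := by
  intro k
  induction k with
  | zero => intro l; rfl
  | succ k ih =>
    intro l
    match l with
    | [] => rfl
    | [a] => rfl
    | a :: b :: t =>
      simp only [pvPassN]
      split_ifs with hc
      · have hne : pvKey x a ≠ pvKey x b := ne_of_gt hc
        simp only [List.filter_cons, ih]
        by_cases ha : pvKey x a = c <;> by_cases hb : pvKey x b = c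
        · exact absurd (ha.trans hb.symm) hne
        · simp [ha, hb]
        · simp [ha, hb]
        · simp [ha, hb]
      · simp only [List.filter_cons, ih]

lemma pvPassN_max (x : Int) : ∀ (t : List (Int × Int)) (a : Int × Int),
    ∃ w z, pvPassN x t.length (a :: t) = w ++ [z] ∧ w.length = t.length ∧ z ∈ a :: t ∧
      (∀ p ∈ a :: t, pvKey x p ≤ pvKey x z) ∧ (∀ p ∈ w, p ∈ a :: t) := by
  intro t
  induction t with
  | nil =>
    intro a
    exact ⟨[], a, rfl, rfl, by simp, by simp, by simp⟩
  | cons b t' ih =>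
    intro a
    by_cases hc : pvKey x a > pvKey x b
    · obtain ⟨w', z', he, hl, hz, hmax, hw⟩ := ih a
      refine ⟨b :: w', z', ?_, by simp [hl], ?_, ?_, ?_⟩
      · simp only [List.length_cons, pvPassN, hc, if_pos, he]
        simp
      · rcases List.mem_cons.mp hz with rfl | h
        · simp
        · simp [h]
      · intro p hp
        rcases List.mem_cons.mp hp with rfl | hp'
        · exact hmax p (by simp)
        · rcases List.mem_cons.mp hp' with rfl | hp''
          · exact le_trans (le_of_lt hc) (hmax a (by simp))
          · exact hmax p (by simp [hp''])
      · intro p hp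
        rcases List.mem_cons.mp hp with rfl | hp'
        · simp
        · rcases List.mem_cons.mp (hw p hp') with rfl | hp''
          · simp
          · simp [hp'']
    · obtain ⟨w', z', he, hl, hz, hmax, hw⟩ := ih b
      have hab : pvKey x a ≤ pvKey x b := le_of_not_gt hc
      refine ⟨a :: w', z', ?_, by simp [hl], ?_, ?_, ?_⟩
      · simp only [List.length_cons, pvPassN, hc, if_neg, he]
        simp
      · rcases List.mem_cons.mp hz with rfl | h
        · simp
        · simp [h]
      · intro p hp
        rcases List.mem_cons.mp hp with rfl | hp'
        · rcases List.mem_cons.mp hz with rfl | h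
          · exact hab
          · exact le_trans hab (hmax b (by simp))
        · exact hmax p hp'
      · intro p hp
        rcases List.mem_cons.mp hp with rfl | hp'
        · simp
        · rcases List.mem_cons.mp (hw p hp') with rfl | hp''
          · simp
          · simp [hp'']

-- Invariant of A's outer loop on the zipped state: a growing sorted suffix of maxima.
lemma pvOuter_inv (x : Int) (dic : List (Int × Int)) :
    ∀ k, k ≤ dic.length - 1 →
    ∃ u d, (List.range k).foldl
        (fun ps i => (List.range (dic.length - i - 1)).foldl (pvStepP x) ps) dic = u ++ d ∧
      u.length = dic.length - k ∧ d.length = k ∧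
      d.Pairwise (fun p q => pvKey x p ≤ pvKey x q) ∧
      (∀ p ∈ u, ∀ q ∈ d, pvKey x p ≤ pvKey x q) ∧
      (∀ c, (u ++ d).filter (fun p => pvKey x p == c)
          = dic.filter (fun p => pvKey x p == c)) := by
  intro k
  induction k with
  | zero =>
    intro _
    exact ⟨dic, [], by simp, by simp, rfl, List.Pairwise.nil, by simp, by simp⟩
  | succ k ih =>
    intro hk
    obtain ⟨u, d, he, hu, hd, hp, hb, hf⟩ := ih (Nat.le_of_succ_le hk)
    have hm : k + 2 ≤ dic.length := by omega
    rw [List.range_succ, List.foldl_append, he]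
    simp only [List.foldl_cons, List.foldl_nil]
    have hL : u.length = (dic.length - k - 1) + 1 := by omega
    rw [pvInner_eq x (dic.length - k - 1) (u ++ d) (by simp; omega),
        pvPassN_split x (dic.length - k - 1) u d hL]
    obtain ⟨a, u₂, rfl⟩ : ∃ a u₂, u = a :: u₂ := by
      cases u with
      | nil => simp at hu; omega
      | cons a u₂ => exact ⟨a, u₂, rfl⟩
    have hL₂ : dic.length - k - 1 = u₂.length := by simp at hu; omega
    rw [hL₂]
    obtain ⟨w, z, hwz, hwl, hz, hmax, hw⟩ := pvPassN_max x u₂ a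
    rw [hwz]
    refine ⟨w, z :: d, by simp, by omega, by simp [hd], ?_, ?_, ?_⟩
    · exact List.Pairwise.cons (fun q hq => hb z hz q hq) hp
    · intro p hp' q hq
      rcases List.mem_cons.mp hq with rfl | hq'
      · exact hmax p (hw p hp')
      · exact hb p (hw p hp') q hq'
    · intro c
      have h1 := pvPassN_filter x c u₂.length ((a :: u₂) ++ d)
      rw [pvPassN_split x u₂.length (a :: u₂) d (by simp), hwz] at h1
      calc (w ++ z :: d).filter (fun p => pvKey x p == c)
          = ((w ++ [z]) ++ d).filter (fun p => pvKey x p == c) := by simp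
        _ = ((a :: u₂) ++ d).filter (fun p => pvKey x p == c) := h1
        _ = dic.filter (fun p => pvKey x p == c) := hf c

-- After the outer loop the zipped state is key-sorted and has A's per-key item subsequences.
lemma pvBubble_sorted (x : Int) (dic : List (Int × Int)) :
    ∃ S, (List.range (dic.length - 1)).foldl
        (fun ps i => (List.range (dic.length - i - 1)).foldl (pvStepP x) ps) dic = S ∧
      S.length = dic.length ∧ S.Pairwise (fun p q => pvKey x p ≤ pvKey x q) ∧
      (∀ c, S.filter (fun p => pvKey x p == c) = dic.filter (fun p => pvKey x p == c)) := by
  obtain ⟨u, d, he, hu, hd, hp, hb, hf⟩ := pvOuter_inv x dic (dic.length - 1) le_rfl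
  refine ⟨u ++ d, he, by simp; omega, ?_, hf⟩
  cases u with
  | nil => simpa using hp
  | cons a u₂ =>
    obtain rfl : u₂ = [] := by
      simp at hu
      exact List.eq_nil_of_length_eq_zero (by omega)
    exact List.Pairwise.cons (fun q hq => hb a (by simp) q hq) hp

lemma pvFilter_insertBy (key : Int × Int → Int) (c : Int) (y : Int × Int) :
    ∀ S : List (Int × Int), S.Pairwise (fun p q => key p ≤ key q) →
    (PySem.List.insertBy (fun a b => decide (key a < key b)) y S).filter (fun p => key p == c)
      = S.filter (fun p => key p == c) ++ if key y == c then [y] else [] := by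
  intro S
  induction S with
  | nil =>
    intro _
    by_cases hyc : (key y == c) = true <;>
      simp [PySem.List.insertBy, List.filter_cons, hyc]
  | cons s t ih =>
    intro hpair
    have hst : ∀ p ∈ t, key s ≤ key p := fun p hp => (List.pairwise_cons.mp hpair).1 p hp
    simp only [PySem.List.insertBy]
    by_cases hys : (decide (key y < key s)) = true
    · rw [if_pos hys]
      have hys' : key y < key s := by simpa using hys
      by_cases hyc : key y = c
      · have hnil : (s :: t).filter (fun p => key p == c) = [] := by
          rw [List.filter_eq_nil_iff]
          intro p hp
          have hlt : c < key p := by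
            rcases List.mem_cons.mp hp with rfl | hp'
            · exact hyc ▸ hys'
            · exact hyc ▸ lt_of_lt_of_le hys' (hst p hp')
          simp only [beq_iff_eq]
          omega
        rw [List.filter_cons, if_pos (by simp [hyc]), hnil]
        simp [hyc]
      · rw [List.filter_cons, if_neg (by simp [hyc])]
        simp [hyc]
    · rw [if_neg hys]
      rw [List.filter_cons, List.filter_cons, ih (List.pairwise_cons.mp hpair).2]
      by_cases hsc : (key s == c) = true
      · rw [if_pos hsc, if_pos hsc]; rfl
      · rw [if_neg hsc, if_neg hsc]

lemma pvFilter_sorted (key : Int × Int → Int) (xs : List (Int × Int)) (c : Int) :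
    (PySem.List.sorted xs key).filter (fun p => key p == c) = xs.filter (fun p => key p == c) := by
  induction xs using List.reverseRecOn with
  | nil => rfl
  | append_singleton ys y ih =>
    have hstep : PySem.List.sorted (ys ++ [y]) key
        = PySem.List.insertBy (fun a b => decide (key a < key b)) y (PySem.List.sorted ys key) := by
      rw [PySem.List.sorted_eq_foldl_insertBy, PySem.List.sorted_eq_foldl_insertBy,
        List.foldl_append, List.foldl_cons, List.foldl_nil]
    rw [hstep, pvFilter_insertBy key c y _ (PySem.List.sorted_pairwise ys key), ih,
      List.filter_append]
    simp [List.filter_cons]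

lemma pvStable_unique (key : Int × Int → Int) : ∀ (ys zs : List (Int × Int)),
    ys.Pairwise (fun p q => key p ≤ key q) → zs.Pairwise (fun p q => key p ≤ key q) →
    (∀ c, ys.filter (fun p => key p == c) = zs.filter (fun p => key p == c)) → ys = zs := by
  intro ys
  induction ys with
  | nil =>
    intro zs _ _ h
    cases zs with
    | nil => rfl
    | cons b zs' =>
      have hb := h (key b)
      simp [List.filter_cons] at hb
  | cons a ys' ih =>
    intro zs hy hz h
    cases zs with
    | nil =>
      have ha := h (key a)
      simp [List.filter_cons] at ha
    | cons b zs' =>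
      have hya : ∀ p ∈ ys', key a ≤ key p := fun p hp => (List.pairwise_cons.mp hy).1 p hp
      have hzb : ∀ p ∈ zs', key b ≤ key p := fun p hp => (List.pairwise_cons.mp hz).1 p hp
      have hab : key a = key b := by
        have hbmem : b ∈ (b :: zs').filter (fun p => key p == key b) := by simp
        rw [← h (key b)] at hbmem
        have hble : key a ≤ key b := by
          rcases List.mem_cons.mp (List.mem_filter.mp hbmem).1 with rfl | hbm
          · exact le_refl _
          · exact hya b hbm
        have hamem : a ∈ (a :: ys').filter (fun p => key p == key a) := by simp
        rw [h (key a)] at hamem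
        have hale : key b ≤ key a := by
          rcases List.mem_cons.mp (List.mem_filter.mp hamem).1 with rfl | ham
          · exact le_refl _
          · exact hzb a ham
        exact le_antisymm hble hale
      have e := h (key a)
      rw [List.filter_cons, List.filter_cons, if_pos (by simp), if_pos (by simp [hab])] at e
      rw [List.cons.injEq] at e
      obtain ⟨rfl, -⟩ := e
      have htails : ∀ c, ys'.filter (fun p => key p == c) = zs'.filter (fun p => key p == c) := by
        intro c
        have e := h c
        rw [List.filter_cons, List.filter_cons] at e
        by_cases hc : (key a == c) = true
        · rw [if_pos hc, if_pos hc, List.cons.injEq] at e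
          exact e.2
        · rwa [if_neg hc, if_neg hc] at e
      rw [ih zs' (List.pairwise_cons.mp hy).2 (List.pairwise_cons.mp hz).2 htails]

lemma pvFoldl_range_getD {α β : Type} (f : β → α → β) (l : List α) (d : α) :
    ∀ (K : Nat), K ≤ l.length → ∀ init,
      (List.range K).foldl (fun b j => f b (l.getD j d)) init = (l.take K).foldl f init := by
  intro K
  induction K with
  | zero => intro _ init; rfl
  | succ K ih =>
    intro hK init
    have hKl : K < l.length := hK
    rw [List.range_succ, List.foldl_append, ih (le_of_lt hKl) init]
    simp only [List.foldl_cons, List.foldl_nil]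
    rw [List.take_succ, List.getElem?_eq_getElem hKl, List.foldl_append,
      List.getD_eq_getElem l d hKl]
    rfl

-- ===== VERDICT (by name: the statement is the Claim_ definition above) =====
theorem sort_dic1_spec : Claim_equal_sort_dic1 := by
  intro dic x n _ hpre
  unfold Spec_sort_dic1
  obtain ⟨S, hS, hSlen, hpair, hfilt⟩ := pvBubble_sorted x dic
  have hst := pvFoldl_hom (fun ps : List (Int × Int) => (ps.map Prod.fst, ps.map Prod.snd))
      (fun st i => (List.range (dic.length - i - 1)).foldl (pvStepA x) st)
      (fun ps i => (List.range (dic.length - i - 1)).foldl (pvStepP x) ps)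
      (fun s i => pvFoldl_hom _ (pvStepA x) (pvStepP x) (pvStepA_eq x)
        (List.range (dic.length - i - 1)) s)
      (List.range (dic.length - 1)) dic
  rw [hS] at hst
  have hsorted : S = PySem.List.sorted dic (pvKey x) := by
    refine pvStable_unique (pvKey x) S (PySem.List.sorted dic (pvKey x)) hpair
      (PySem.List.sorted_pairwise dic (pvKey x)) ?_
    intro c
    rw [hfilt c, pvFilter_sorted (pvKey x) dic c]
  have hK : (n + 1).toNat ≤ S.length := by
    rw [hSlen]
    unfold Pre_sort_dic1 at hpre
    omega
  have htake : (List.range (n + 1).toNat).foldl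
      (fun d j => PySem.Dict.insert d (S.getD j (0, 0)).1 (S.getD j (0, 0)).2) PySem.Dict.empty
       = (S.take (n + 1).toNat).foldl
      (fun d p => PySem.Dict.insert d p.1 p.2) PySem.Dict.empty :=
    pvFoldl_range_getD (fun d p => PySem.Dict.insert d p.1 p.2) S (0, 0) (n + 1).toNat hK
      PySem.Dict.empty
  have hA : sort_dic1 dic x n
      = ((S.take (n + 1).toNat).foldl
          (fun d p => PySem.Dict.insert d p.1 p.2) PySem.Dict.empty).items := by
    simp only [sort_dic1]
    rw [hst]
    simp only [pvGetD_fst, pvGetD_snd]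
    rw [htake]
  have hmax : (max (n + 1) 0).toNat = (n + 1).toNat := by omega
  have hkey : (fun kv : Int × Int => |kv.1 - x|) = pvKey x := rfl
  have hB : sort_dic1_alt dic x n
      = ((S.take (n + 1).toNat).foldl
          (fun d p => PySem.Dict.insert d p.1 p.2) PySem.Dict.empty).items := by
    simp only [sort_dic1_alt]
    rw [PySem.List.slice_to _ (le_max_right (n + 1) 0), hmax, hkey, ← hsorted]
    rfl
  rw [hA, hB]
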